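-- pv_equiv track=rewrite | github.com/gh-hj5/ai | export_service.py | wrap_pdf_line
-- ===== SOURCE A (Python) =====
-- def wrap_pdf_line(text, width):
--     if not text:
--         return ['']
--     lines = []
--     current = ''
--     for char in text:
--         current += char
--         if len(current) >= width:
--             lines.append(current)
--             current = ''
--     if current:
--         lines.append(current)
--     return lines or ['']
-- ===== SOURCE B (Python) =====
-- def wrap_pdf_line(text, width):
--     step = max(width, 1)
--     chunks = []
--     while text:
--         chunks.append(text[:step])
--         text = text[step:]
--     return chunks or ['']
-- ===== Notes on version B (the rewrite author's own statement) =====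
-- stated objective: idiomatic
-- what changed: B slices the string into width-sized chunks with a striding while loop (step = max(width,1)) instead of accumulating a running buffer character by character and flushing it on a length test.
import Mathlib
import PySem

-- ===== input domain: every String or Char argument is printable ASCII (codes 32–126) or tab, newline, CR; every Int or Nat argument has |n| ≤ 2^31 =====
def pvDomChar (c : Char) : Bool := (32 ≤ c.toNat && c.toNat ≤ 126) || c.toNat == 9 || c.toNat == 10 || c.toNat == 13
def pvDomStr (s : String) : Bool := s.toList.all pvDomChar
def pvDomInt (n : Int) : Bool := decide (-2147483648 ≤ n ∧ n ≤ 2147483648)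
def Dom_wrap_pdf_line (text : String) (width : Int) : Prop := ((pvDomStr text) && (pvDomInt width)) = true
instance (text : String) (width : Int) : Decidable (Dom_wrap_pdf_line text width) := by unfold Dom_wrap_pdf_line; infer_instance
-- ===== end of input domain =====

-- B replaces A's character-by-character buffer accumulation by a striding while loop over
-- width-sized slices (step = max(width,1)); objective: a more idiomatic, equally fast implementation.

-- ===== PORT A =====
-- the for-loop of A over the characters, with state (lines, current)
def wrapA_loop (width : Int) : List Char → List String → List Char → List String
  | [], lines, current =>
      -- after the loop: 'if current: lines.append(current)'
      if current = [] then lines else lines ++ [String.ofList current]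
  | c :: cs, lines, current =>
      let cur := current ++ [c]
      if width ≤ (cur.length : Int) then wrapA_loop width cs (lines ++ [String.ofList cur]) []
      else wrapA_loop width cs lines cur

def wrap_pdf_line (text : String) (width : Int) : List String :=
  if text = "" then [""]
  else
    let lines := wrapA_loop width text.toList [] []
    if lines = [] then [""] else lines

-- ===== PORT B =====
-- the while loop of Source B: chunks.append(text[:step]); text = text[step:]
def wrapB_loop (step : Nat) (hstep : 0 < step) (s : List Char) : List String :=
  if s = [] then []
  else String.ofList (s.take step) :: wrapB_loop step hstep (s.drop step)
termination_by s.length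
decreasing_by
  rename_i h
  have : s.length ≠ 0 := by simpa [List.length_eq_zero_iff] using h
  simp only [List.length_drop]; omega

def wrap_pdf_line_alt (text : String) (width : Int) : List String :=
  let step := width.toNat.max 1            -- max(width, 1) on Int equals this Nat
  let chunks := wrapB_loop step (Nat.lt_of_lt_of_le Nat.one_pos (Nat.le_max_right _ _)) text.toList
  if chunks = [] then [""] else chunks

-- ===== PRECONDITION & SPEC =====
def Spec_wrap_pdf_line (text : String) (width : Int) (out : List String) : Prop := out = wrap_pdf_line_alt text width
instance (text : String) (width : Int) (out : List String) : Decidable (Spec_wrap_pdf_line text width out) := by unfold Spec_wrap_pdf_line; infer_instance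

-- ===== CLAIM (what is proved, stated in full; the proofs are below) =====
def Claim_equal_wrap_pdf_line : Prop := ∀ (text : String) (width : Int), Dom_wrap_pdf_line text width → Spec_wrap_pdf_line text width (wrap_pdf_line text width)

-- ===== LEMMAS AND PROOFS =====

theorem step_pos (width : Int) : 0 < width.toNat.max 1 :=
  Nat.lt_of_lt_of_le Nat.one_pos (Nat.le_max_right _ _)

theorem wrapB_loop_nil (step : Nat) (h : 0 < step) : wrapB_loop step h [] = [] := by
  rw [wrapB_loop]; simp

-- One step of B's loop on a nonempty list.
theorem wrapB_loop_cons (step : Nat) (h : 0 < step) (s : List Char) (hs : s ≠ []) :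
    wrapB_loop step h s = String.ofList (s.take step) :: wrapB_loop step h (s.drop step) := by
  rw [wrapB_loop]; simp [hs]

-- A's flush condition 'width ≤ len(current)' coincides with 'max(width,1) ≤ len(current)'
-- whenever current is nonempty.
theorem trigger_iff (width : Int) (n : Nat) (hn : 0 < n) :
    (width ≤ (n : Int)) ↔ (width.toNat.max 1 ≤ n) := by
  rw [Nat.max_le]; omega

-- Invariant of A's loop: with a partial buffer shorter than the step, the loop produces
-- exactly the chunks of (cur ++ s) appended to the accumulated lines.
theorem wrapA_loop_eq (width : Int) (step : Nat) (hstep : step = width.toNat.max 1) :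
    ∀ (s : List Char) (lines : List String) (cur : List Char), cur.length < step →
      wrapA_loop width s lines cur = lines ++ wrapB_loop step (hstep ▸ step_pos width) (cur ++ s)
  | [], lines, cur, hcur => by
    rw [wrapA_loop, List.append_nil]
    by_cases hc : cur = []
    · subst hc; rw [if_pos rfl, wrapB_loop_nil, List.append_nil]
    · rw [if_neg hc, wrapB_loop_cons _ _ cur hc,
          List.take_of_length_le (by omega), List.drop_eq_nil_of_le (by omega), wrapB_loop_nil]
  | c :: cs, lines, cur, hcur => by
    rw [wrapA_loop]
    have hlen : (cur ++ [c]).length = cur.length + 1 := by simp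
    by_cases ht : width ≤ ((cur ++ [c]).length : Int)
    · -- flush: the buffer has exactly `step` characters
      have hstep' : (cur ++ [c]).length = step := by
        have := (trigger_iff width (cur ++ [c]).length (by omega)).mp ht
        omega
      rw [if_pos ht, wrapA_loop_eq width step hstep cs (lines ++ [String.ofList (cur ++ [c])]) []
            (by simpa using hstep ▸ step_pos width)]
      rw [wrapB_loop_cons _ _ (cur ++ c :: cs) (by simp)]
      have hsplit : cur ++ c :: cs = (cur ++ [c]) ++ cs := by simp
      rw [hsplit, List.take_append_of_le_length (by omega), List.drop_append_of_le_length (by omega)]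
      rw [List.take_of_length_le (by omega), List.drop_eq_nil_of_le (by omega)]
      simp
    · -- keep accumulating
      have hlt : (cur ++ [c]).length < step := by
        have := (trigger_iff width (cur ++ [c]).length (by omega)).not.mp ht
        omega
      rw [if_neg ht, wrapA_loop_eq width step hstep cs lines (cur ++ [c]) hlt]
      simp

-- B's loop never returns [] on a nonempty list.
theorem wrapB_loop_ne_nil (step : Nat) (h : 0 < step) (s : List Char) (hs : s ≠ []) :
    wrapB_loop step h s ≠ [] := by
  rw [wrapB_loop_cons step h s hs]; simp

-- ===== VERDICT (by name: the statement is the Claim_ definition above) =====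
theorem wrap_pdf_line_spec : Claim_equal_wrap_pdf_line := by
  intro text width _
  unfold Spec_wrap_pdf_line wrap_pdf_line wrap_pdf_line_alt
  by_cases h : text = ""
  · subst h
    rw [if_pos rfl]
    simp only [show ("" : String).toList = [] from rfl, wrapB_loop_nil]
    simp
  · have hlist : text.toList ≠ [] :=
      fun hn => h (String.toList_eq_nil_iff.mp hn)
    rw [if_neg h]
    have hmain := wrapA_loop_eq width (width.toNat.max 1) rfl text.toList [] [] (step_pos width)
    simp only [List.nil_append] at hmain
    rw [hmain, if_neg (wrapB_loop_ne_nil _ _ _ hlist)]
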